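-- pv_equiv track=rewrite | github.com/Saketh-lab/SEP | evaluator_sequoia.py | _select_diverse_examples
-- ===== SOURCE A (Python) =====
-- def _select_diverse_examples(examples: list, n: int = 5) -> list:
--     """
--     Select a diverse set of examples across stages and sectors for better few-shot context.
--     """
--     if len(examples) <= n:
--         return examples
--
--     # Try to get diversity across stages
--     stages = {}
--     for ex in examples:
--         stage = ex.get("stage_at_investment", "Unknown")
--         if stage not in stages:
--             stages[stage] = []
--         stages[stage].append(ex)
--
--     selected = []
--     stage_order = ["Seed / Series A equivalent", "Series A", "Series B", "Growth", "Unknown"]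
--
--     for stage in stage_order:
--         if stage in stages and len(selected) < n:
--             selected.append(stages[stage][0])
--
--     # Fill remaining slots
--     for ex in examples:
--         if len(selected) >= n:
--             break
--         if ex not in selected:
--             selected.append(ex)
--
--     return selected[:n]
-- ===== SOURCE B (Python) =====
-- def _select_diverse_examples(examples: list, n: int = 5) -> list:
--     """Same selection without building the stage-grouping dict: one scan per stage."""
--     if len(examples) <= n:
--         return examples
--
--     stage_order = ["Seed / Series A equivalent", "Series A", "Series B", "Growth", "Unknown"]
--
--     selected = []
--     for stage in stage_order:
--         if len(selected) < n:
--             for ex in examples: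
--                 if ex.get("stage_at_investment", "Unknown") == stage:
--                     selected.append(ex)
--                     break
--
--     for ex in examples:
--         if len(selected) >= n:
--             break
--         if ex not in selected:
--             selected.append(ex)
--
--     return selected[:n]
-- ===== Notes on version B (the rewrite author's own statement) =====
-- stated objective: simpler
-- what changed: Removed the stage-grouping dict entirely: instead of building an index of whole per-stage groups and taking each group's first element, B scans the examples list once per stage in stage_order for the first example of that stage; the size guard, fill loop and final slice stay the same.
import Mathlib
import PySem

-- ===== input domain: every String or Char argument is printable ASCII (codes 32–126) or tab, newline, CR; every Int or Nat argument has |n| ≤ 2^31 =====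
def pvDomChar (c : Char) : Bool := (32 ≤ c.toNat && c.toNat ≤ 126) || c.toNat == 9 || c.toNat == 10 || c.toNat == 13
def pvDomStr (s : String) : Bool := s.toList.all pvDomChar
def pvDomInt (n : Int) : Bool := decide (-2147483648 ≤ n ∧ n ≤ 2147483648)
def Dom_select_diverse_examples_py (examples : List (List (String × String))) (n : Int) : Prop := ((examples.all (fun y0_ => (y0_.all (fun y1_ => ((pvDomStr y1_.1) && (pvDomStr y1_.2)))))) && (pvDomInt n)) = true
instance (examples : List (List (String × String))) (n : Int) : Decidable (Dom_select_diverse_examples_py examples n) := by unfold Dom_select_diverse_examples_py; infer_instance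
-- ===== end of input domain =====

-- B drops A's stage-grouping dict and instead scans `examples` once per stage for the first
-- matching example (objective: simpler — no grouping pass, no index that keeps whole groups).

-- ===== shared helpers (language-level primitives both Pythons use verbatim) =====
-- the fixed stage order (same literal in both programs)
def pvStageOrder : List String :=
  ["Seed / Series A equivalent", "Series A", "Series B", "Growth", "Unknown"]

-- ex.get("stage_at_investment", "Unknown")
def pvStageOf (ex : List (String × String)) : String :=
  (PySem.Dict.mk ex).getD "stage_at_investment" "Unknown"

-- Python dict '==': same key set, same value at every key (insertion order ignored)
def pvDictEq (a b : List (String × String)) : Bool :=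
  ((a.map Prod.fst).all (fun k => (PySem.Dict.mk a).get? k == (PySem.Dict.mk b).get? k)) &&
  ((b.map Prod.fst).all (fun k => (PySem.Dict.mk a).get? k == (PySem.Dict.mk b).get? k))

-- the fill loop, textually identical in A and in B, ported once:
-- 'for ex in examples: if len(selected) >= n: break; if ex not in selected: selected.append(ex)'
def pvFill (n : Int) : List (List (String × String)) → List (List (String × String)) → List (List (String × String))
  | [], sel => sel
  | ex :: rest, sel =>
      if n ≤ (sel.length : Int) then sel
      else if sel.all (fun s => !(pvDictEq ex s)) then pvFill n rest (sel ++ [ex])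
      else pvFill n rest sel

-- ===== PORT A =====
-- the grouping loop: 'if stage not in stages: stages[stage] = []' followed by
-- 'stages[stage].append(ex)' is exactly d.modify stage [] (· ++ [ex])
def pvStagesA (examples : List (List (String × String))) : PySem.Dict String (List (List (String × String))) :=
  examples.foldl (fun d ex => d.modify (pvStageOf ex) [] (· ++ [ex])) PySem.Dict.empty

-- 'for stage in stage_order: if stage in stages and len(selected) < n: selected.append(stages[stage][0])'
-- stages[stage][0] is in range: every value stored in stages is a nonempty group
def pvSelectedA (examples : List (List (String × String))) (n : Int) : List (List (String × String)) :=
  pvStageOrder.foldl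
    (fun sel stage =>
      if (pvStagesA examples).contains stage ∧ (sel.length : Int) < n then
        sel ++ [PySem.List.pyGetD ((pvStagesA examples).getD stage []) 0 []]
      else sel) []

def select_diverse_examples_py (examples : List (List (String × String))) (n : Int) : List (List (String × String)) :=
  if (PySem.List.len examples) ≤ n then examples
  else PySem.List.slice (pvFill n examples (pvSelectedA examples n)) none (some n)

-- ===== PORT B =====
-- 'for stage in stage_order: if len(selected) < n: for ex in examples: if ex.get(...) == stage: selected.append(ex); break'
def pvSelectedB (examples : List (List (String × String))) (n : Int) : List (List (String × String)) :=
  pvStageOrder.foldl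
    (fun sel stage =>
      if (sel.length : Int) < n then
        match examples.find? (fun ex => pvStageOf ex == stage) with
        | some ex => sel ++ [ex]
        | none => sel
      else sel) []

def select_diverse_examples_py_alt (examples : List (List (String × String))) (n : Int) : List (List (String × String)) :=
  if (PySem.List.len examples) ≤ n then examples
  else PySem.List.slice (pvFill n examples (pvSelectedB examples n)) none (some n)

-- ===== PRECONDITION & SPEC =====
def Spec_select_diverse_examples_py (examples : List (List (String × String))) (n : Int) (out : List (List (String × String))) : Prop := out = select_diverse_examples_py_alt examples n
instance (examples : List (List (String × String))) (n : Int) (out : List (List (String × String))) : Decidable (Spec_select_diverse_examples_py examples n out) := by unfold Spec_select_diverse_examples_py; infer_instance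

-- ===== CLAIM (what is proved, stated in full; the proofs are below) =====
def Claim_equal_select_diverse_examples_py : Prop := ∀ (examples : List (List (String × String))) (n : Int), Dom_select_diverse_examples_py examples n → Spec_select_diverse_examples_py examples n (select_diverse_examples_py examples n)

-- ===== LEMMAS AND PROOFS =====

-- the group A stores under stage s is exactly the examples whose stage is s, in order
theorem stagesA_foldl_getD (examples : List (List (String × String))) (s : String)
    (d : PySem.Dict String (List (List (String × String)))) :
    (examples.foldl (fun d ex => d.modify (pvStageOf ex) [] (· ++ [ex])) d).getD s []
      = d.getD s [] ++ examples.filter (fun ex => pvStageOf ex == s) := by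
  induction examples generalizing d with
  | nil => simp
  | cons ex rest ih =>
      simp only [List.foldl_cons, ih, PySem.Dict.getD_modify, List.filter_cons]
      by_cases h : s = pvStageOf ex
      · simp [h]
      · have : (pvStageOf ex == s) = false := by simp [Ne.symm h]
        simp [h, this]

theorem stagesA_getD (examples : List (List (String × String))) (s : String) :
    (pvStagesA examples).getD s [] = examples.filter (fun ex => pvStageOf ex == s) := by
  unfold pvStagesA
  rw [stagesA_foldl_getD]
  simp

-- 'stage in stages' holds exactly when some example has that stage
theorem stagesA_foldl_contains (examples : List (List (String × String))) (s : String)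
    (d : PySem.Dict String (List (List (String × String)))) :
    (examples.foldl (fun d ex => d.modify (pvStageOf ex) [] (· ++ [ex])) d).contains s
      = (d.contains s || examples.any (fun ex => pvStageOf ex == s)) := by
  induction examples generalizing d with
  | nil => simp
  | cons ex rest ih =>
      simp only [List.foldl_cons, ih, PySem.Dict.contains_modify, List.any_cons]
      cases h : (s == pvStageOf ex) with
      | true =>
          have h2 : (pvStageOf ex == s) = true := by
            simp at h ⊢; exact h.symm
          simp [h2]
      | false =>
          have h2 : (pvStageOf ex == s) = false := by
            simp at h ⊢; exact fun e => h e.symm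
          simp [h2]

theorem stagesA_contains (examples : List (List (String × String))) (s : String) :
    (pvStagesA examples).contains s = true ↔ ∃ ex ∈ examples, pvStageOf ex = s := by
  unfold pvStagesA
  rw [stagesA_foldl_contains]
  simp

-- the per-stage step of A (index lookup) equals the per-stage step of B (first-match scan)
theorem step_eq (examples : List (List (String × String))) (n : Int)
    (sel : List (List (String × String))) (stage : String) :
    (if (pvStagesA examples).contains stage ∧ (sel.length : Int) < n then
        sel ++ [PySem.List.pyGetD ((pvStagesA examples).getD stage []) 0 []]
      else sel)
    = (if (sel.length : Int) < n then
        match examples.find? (fun ex => pvStageOf ex == stage) with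
        | some ex => sel ++ [ex]
        | none => sel
      else sel) := by
  rw [show examples.find? (fun ex => pvStageOf ex == stage)
      = (examples.filter (fun ex => pvStageOf ex == stage)).head? from List.head?_filter.symm]
  cases hf : examples.filter (fun ex => pvStageOf ex == stage) with
  | nil =>
      have hc : ¬ (pvStagesA examples).contains stage = true := by
        rw [stagesA_contains]
        rintro ⟨ex, hmem, hst⟩
        have : ex ∈ examples.filter (fun ex => pvStageOf ex == stage) :=
          List.mem_filter.mpr ⟨hmem, by simp [hst]⟩
        simp [hf] at this
      simp [hc]
  | cons x xs =>
      have hc : (pvStagesA examples).contains stage = true := by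
        rw [stagesA_contains]
        have hx : x ∈ examples.filter (fun ex => pvStageOf ex == stage) := by
          rw [hf]; exact List.mem_cons_self
        exact ⟨x, (List.mem_filter.mp hx).1, by
          have := (List.mem_filter.mp hx).2; simpa using this⟩
      rw [stagesA_getD, hf]
      by_cases hn : (sel.length : Int) < n
      · simp [hc, hn, PySem.List.pyGetD_zero_cons]
      · simp [hc, hn]

theorem selected_eq (examples : List (List (String × String))) (n : Int) :
    pvSelectedA examples n = pvSelectedB examples n := by
  unfold pvSelectedA pvSelectedB
  congr 1
  funext sel stage
  exact step_eq examples n sel stage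

-- ===== VERDICT (by name: the statement is the Claim_ definition above) =====
theorem select_diverse_examples_py_spec : Claim_equal_select_diverse_examples_py := by
  intro examples n _
  unfold Spec_select_diverse_examples_py select_diverse_examples_py select_diverse_examples_py_alt
  rw [selected_eq]
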